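-- pv_equiv track=rewrite | github.com/azit99/Excel-FIT2021BoxesDetection | decoder.py | get_miss_edge
-- ===== SOURCE A (Python) =====
-- def get_miss_edge(edges):
--     new_edges=[]
--     new_pair= []
--     for e in edges:
--         for p in e:
--             found=False
--             for e2 in edges:
--                 if e2 == e:
--                     continue
--                 if e2[0] == p or e2[1] == p:
--                     found= True
--             if not found:
--                 new_pair.append(p)
--         if len(new_pair) == 2:
--             new_edges.append(new_pair)
--             new_pair=[]
--     return new_edges
-- ===== SOURCE B (Python) =====
-- def get_miss_edge(edges):
--     # One pass builds seen: endpoint -> the unique edge touching it in slot 0/1, or None if several distinct edges do.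
--     seen = {}
--     for e in edges:
--         for p in e[:2]:
--             if p not in seen:
--                 seen[p] = e
--             elif seen[p] != e:
--                 seen[p] = None
--     new_edges = []
--     new_pair = []
--     for e in edges:
--         new_pair += [p for p in e if seen.get(p, e) == e]
--         if len(new_pair) == 2:
--             new_edges.append(new_pair)
--             new_pair = []
--     return new_edges
-- ===== Notes on version B (the rewrite author's own statement) =====
-- stated objective: faster
-- what changed: B replaces A's O(E^2) rescan of the whole edge list for every endpoint by a single pass that builds a dict endpoint -> unique touching edge (or None on a clash), so each isolation test becomes one O(1) lookup; the output pair-buffer assembly is A's and is kept, so B returns A's exact value wherever A returns.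
import Mathlib
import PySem

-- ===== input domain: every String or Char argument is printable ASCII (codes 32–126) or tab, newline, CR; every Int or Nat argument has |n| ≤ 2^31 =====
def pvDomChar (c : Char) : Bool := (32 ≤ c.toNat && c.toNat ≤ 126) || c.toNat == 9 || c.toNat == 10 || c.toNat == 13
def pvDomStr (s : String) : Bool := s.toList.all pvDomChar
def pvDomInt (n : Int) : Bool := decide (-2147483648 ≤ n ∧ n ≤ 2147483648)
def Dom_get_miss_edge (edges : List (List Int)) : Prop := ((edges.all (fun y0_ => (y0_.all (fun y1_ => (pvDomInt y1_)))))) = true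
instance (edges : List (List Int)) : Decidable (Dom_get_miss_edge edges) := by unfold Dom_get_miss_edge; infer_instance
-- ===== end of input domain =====

-- B replaces A's O(E^2) rescans of the whole edge list per endpoint by one dict-building pass
-- (endpoint -> its unique touching edge, or None if several); the output pair-buffer assembly is
-- A's and is kept, so the two functions agree on every input on which A returns.

-- ===== PORT A =====
-- A's innermost loop: scan all edges, set found when another edge touches p in slot 0 or 1
def pvFound (edges : List (List Int)) (e : List Int) (p : Int) : Bool :=
  edges.foldl (fun found e2 =>
    if e2 = e then found
    else if PySem.List.pyGet? e2 0 = some p ∨ PySem.List.pyGet? e2 1 = some p then true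
    else found) false

-- A's outer-loop body: extend new_pair with the not-found endpoints of e, flush when length is exactly 2
def pvStepA (edges : List (List Int)) (st : List (List Int) × List Int) (e : List Int) :
    List (List Int) × List Int :=
  let np := e.foldl (fun np p => if !(pvFound edges e p) then np ++ [p] else np) st.2
  if np.length = 2 then (st.1 ++ [np], ([] : List Int)) else (st.1, np)

def get_miss_edge (edges : List (List Int)) : List (List Int) :=
  (edges.foldl (pvStepA edges) ([], [])).1

-- ===== PORT B =====
-- record endpoint p of edge e: a first edge is kept, a second value-distinct edge overwrites with none
def pvRecord (d : PySem.Dict Int (Option (List Int))) (e : List Int) (p : Int) :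
    PySem.Dict Int (Option (List Int)) :=
  match d.get? p with
  | none => d.insert p (some e)
  | some v => if v ≠ some e then d.insert p none else d

-- B's one dict-building pass: `for e in edges: for p in e[:2]: ...`
def pvSeen (edges : List (List Int)) : PySem.Dict Int (Option (List Int)) :=
  edges.foldl (fun d e => (PySem.List.slice e none (some 2)).foldl (fun d p => pvRecord d e p) d)
    PySem.Dict.empty

-- B's output loop: `new_pair += [p for p in e if seen.get(p, e) == e]`, flush at length exactly 2
def get_miss_edge_alt (edges : List (List Int)) : List (List Int) :=
  let seen := pvSeen edges
  (edges.foldl (fun (st : List (List Int) × List Int) e =>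
      let np := st.2 ++ e.filter (fun p => seen.getD p (some e) == some e)
      if np.length = 2 then (st.1 ++ [np], ([] : List Int)) else (st.1, np))
    ([], [])).1

-- ===== PRECONDITION & SPEC =====
-- Pre_ is exactly the inputs on which the Python A returns normally: A raises IndexError as soon as
-- some endpoint p of an edge e is checked against a value-distinct edge f that is empty, or has a
-- single element different from p.
def Pre_get_miss_edge (edges : List (List Int)) : Prop :=
  ∀ e ∈ edges, ∀ p ∈ e, ∀ f ∈ edges, f ≠ e → 2 ≤ f.length ∨ f = [p]
instance (edges : List (List Int)) : Decidable (Pre_get_miss_edge edges) := by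
  unfold Pre_get_miss_edge; infer_instance
def pvWitness_get_miss_edge : List (List Int) := [[1, 2], [3, 4]]

def Spec_get_miss_edge (edges : List (List Int)) (out : List (List Int)) : Prop :=
  out = get_miss_edge_alt edges
instance (edges : List (List Int)) (out : List (List Int)) : Decidable (Spec_get_miss_edge edges out) := by
  unfold Spec_get_miss_edge; infer_instance

-- ===== CLAIM (what is proved, stated in full; the proofs are below) =====
def Claim_equal_get_miss_edge : Prop :=
  ∀ (edges : List (List Int)), Dom_get_miss_edge edges → Pre_get_miss_edge edges →
    Spec_get_miss_edge edges (get_miss_edge edges)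

-- ===== LEMMAS AND PROOFS =====

-- proof-only helpers: Boolean forms of A's slot-0/slot-1 test and of isolation
def pvTouches (e2 : List Int) (p : Int) : Bool :=
  PySem.List.pyGet? e2 0 == some p || PySem.List.pyGet? e2 1 == some p

def pvIsoB (edges : List (List Int)) (e : List Int) (p : Int) : Bool :=
  edges.all (fun e2 => e2 == e || !(pvTouches e2 p))

-- per-endpoint state machine that the dict pass implements at each key
def pvStepState (s : Option (Option (List Int))) (e : List Int) : Option (Option (List Int)) :=
  match s with
  | none => some (some e)
  | some v => if v = some e then some v else some none

def pvStep' (p : Int) (s : Option (Option (List Int))) (e : List Int) : Option (Option (List Int)) :=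
  if (e.take 2).contains p then pvStepState s e else s

lemma pvFound_go (e : List Int) (p : Int) :
    ∀ (l : List (List Int)) (b : Bool),
      l.foldl (fun found e2 =>
        if e2 = e then found
        else if PySem.List.pyGet? e2 0 = some p ∨ PySem.List.pyGet? e2 1 = some p then true
        else found) b
      = (b || !(l.all (fun e2 => e2 == e || !(pvTouches e2 p)))) := by
  intro l
  induction l with
  | nil => simp
  | cons h t ih =>
    intro b
    simp only [List.foldl_cons, List.all_cons, ih]
    by_cases he : h = e
    · simp [he, pvTouches]
    · by_cases ht : PySem.List.pyGet? h 0 = some p ∨ PySem.List.pyGet? h 1 = some p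
      · rcases ht with ht | ht <;> simp [he, ht, pvTouches, beq_iff_eq]
      · rw [if_neg ht]
        rw [not_or] at ht
        have h1 : (PySem.List.pyGet? h 0 == some p) = false := by simp [ht.1]
        have h2 : (PySem.List.pyGet? h 1 == some p) = false := by simp [ht.2]
        simp [he, h1, h2, pvTouches]

lemma pvFound_eq (edges : List (List Int)) (e : List Int) (p : Int) :
    pvFound edges e p = !(pvIsoB edges e p) := by
  unfold pvFound pvIsoB
  rw [pvFound_go e p edges false]
  simp

-- A's slot-0/slot-1 test is membership in the first two elements
lemma touches_take2 (e2 : List Int) (p : Int) :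
    pvTouches e2 p = (e2.take 2).contains p := by
  apply Bool.eq_iff_iff.mpr
  rcases e2 with _ | ⟨x, _ | ⟨y, r⟩⟩
  · simp [pvTouches, pysem]
  · simp [pvTouches, pysem]
    exact eq_comm
  · simp [pvTouches, pysem]
    constructor <;> rintro (h | h) <;> simp [h]

-- A's inner endpoint loop appends the isolated endpoints
lemma np_fold (edges : List (List Int)) (e : List Int) :
    ∀ (l : List Int) (buf : List Int),
      l.foldl (fun np p => if !(pvFound edges e p) then np ++ [p] else np) buf
      = buf ++ l.filter (fun p => pvIsoB edges e p) := by
  intro l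
  induction l with
  | nil => intro buf; simp
  | cons p t ih =>
    intro buf
    simp only [List.foldl_cons]
    rw [show (if !(pvFound edges e p) then buf ++ [p] else buf)
        = (if pvIsoB edges e p then buf ++ [p] else buf) from by rw [pvFound_eq]; simp]
    cases h : pvIsoB edges e p
    · rw [if_neg (by simp), ih buf, List.filter_cons, h]
      simp
    · rw [if_pos rfl, ih (buf ++ [p]), List.filter_cons, h]
      simp

-- ----- dict side -----

lemma pvRecord_get_self (d : PySem.Dict Int (Option (List Int))) (e : List Int) (q : Int) :
    (pvRecord d e q).get? q = pvStepState (d.get? q) e := by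
  unfold pvRecord pvStepState
  cases h : d.get? q with
  | none => simp [PySem.Dict.get?_insert_self]
  | some v =>
    by_cases hv : v = some e
    · simp [hv, h]
    · simp [hv, PySem.Dict.get?_insert_self]

lemma pvRecord_get_ne (d : PySem.Dict Int (Option (List Int))) (e : List Int) (q p : Int)
    (hpq : p ≠ q) : (pvRecord d e q).get? p = d.get? p := by
  unfold pvRecord
  cases h : d.get? q with
  | none => simp [PySem.Dict.get?_insert, hpq]
  | some v =>
    by_cases hv : v = some e
    · simp [hv]
    · simp [hv, PySem.Dict.get?_insert, hpq]

lemma pvStepState_idem (s : Option (Option (List Int))) (e : List Int) :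
    pvStepState (pvStepState s e) e = pvStepState s e := by
  unfold pvStepState
  cases s with
  | none => simp
  | some v => by_cases hv : v = some e <;> simp [hv]

-- effect of one registration pass (over e.take 2) on a single key
lemma reg_get (e : List Int) (d : PySem.Dict Int (Option (List Int))) (p : Int) :
    ((e.take 2).foldl (fun d q => pvRecord d e q) d).get? p
      = pvStep' p (d.get? p) e := by
  unfold pvStep'
  rcases e with _ | ⟨a, _ | ⟨b, r⟩⟩
  · simp
  · simp only [List.take, List.foldl_cons, List.foldl_nil]
    by_cases ha : p = a
    · subst ha
      rw [pvRecord_get_self]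
      simp
    · rw [pvRecord_get_ne _ _ _ _ ha]
      simp
      intro h
      exact absurd h ha
  · simp only [List.take, List.foldl_cons, List.foldl_nil]
    by_cases hb : p = b
    · subst hb
      rw [pvRecord_get_self]
      by_cases ha : p = a
      · subst ha
        rw [pvRecord_get_self, pvStepState_idem]
        simp
      · rw [pvRecord_get_ne _ _ _ _ ha]
        simp
    · rw [pvRecord_get_ne _ _ _ _ hb]
      by_cases ha : p = a
      · subst ha
        rw [pvRecord_get_self]
        simp
      · rw [pvRecord_get_ne _ _ _ _ ha]
        simp
        rintro (h | h)
        · exact absurd h ha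
        · exact absurd h hb

-- e[:2] is take 2
lemma slice_two (e : List Int) : PySem.List.slice e none (some 2) = e.take 2 := by
  have h := PySem.List.slice_to_natCast (xs := e) (b := 2)
  simpa using h

lemma seen_fold_get :
    ∀ (l : List (List Int)) (d : PySem.Dict Int (Option (List Int))) (p : Int),
      (l.foldl (fun d e => (PySem.List.slice e none (some 2)).foldl (fun d p => pvRecord d e p) d) d).get? p
        = l.foldl (pvStep' p) (d.get? p) := by
  intro l
  induction l with
  | nil => intro d p; rfl
  | cons e t ih =>
    intro d p
    simp only [slice_two] at ih ⊢
    simp only [List.foldl_cons]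
    rw [ih, reg_get]

lemma state_sticky (p : Int) : ∀ (l : List (List Int)),
    l.foldl (pvStep' p) (some none) = some none := by
  intro l
  induction l with
  | nil => rfl
  | cons e t ih =>
    simp only [List.foldl_cons]
    have : pvStep' p (some none) e = some none := by
      unfold pvStep' pvStepState
      split <;> simp
    rw [this, ih]

lemma fold_state_some (p : Int) (t : List Int) :
    ∀ (l : List (List Int)) (s : Option (Option (List Int))),
      (l.foldl (pvStep' p) s = some (some t)) ↔
      ((s = some (some t) ∨ (s = none ∧ ∃ e ∈ l, (e.take 2).contains p = true)) ∧
       ∀ e ∈ l, (e.take 2).contains p = true → e = t) := by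
  intro l
  induction l with
  | nil => intro s; simp
  | cons e tl ih =>
    intro s
    simp only [List.foldl_cons]
    by_cases he : (e.take 2).contains p
    · have hstep : pvStep' p s e = pvStepState s e := by
        unfold pvStep'; rw [if_pos he]
      rw [hstep]
      cases s with
      | none =>
        rw [ih]
        unfold pvStepState
        constructor
        · rintro ⟨h1, h2⟩
          rcases h1 with h1 | ⟨h1, -⟩
          · have het : e = t := by injection h1 with h1; injection h1
            exact ⟨Or.inr ⟨rfl, e, by simpa using he⟩, by
              intro f hf htf
              rcases List.mem_cons.mp hf with rfl | hf
              · exact het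
              · exact h2 f hf htf⟩
          · exact absurd h1 (by simp)
        · rintro ⟨-, h2⟩
          have hte := h2 e (by simp) he
          refine ⟨Or.inl (by rw [hte]), fun f hf => h2 f (List.mem_cons_of_mem _ hf)⟩
      | some v =>
        by_cases hv : v = some e
        · have : pvStepState (some v) e = some v := by
            unfold pvStepState; simp [hv]
          rw [this, ih]
          constructor
          · rintro ⟨h1, h2⟩
            rcases h1 with h1 | ⟨h1, -⟩
            · refine ⟨Or.inl h1, ?_⟩
              intro f hf htf
              rcases List.mem_cons.mp hf with rfl | hf
              · have hvt : v = some t := by injection h1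
                rw [hv] at hvt
                injection hvt
              · exact h2 f hf htf
            · exact absurd h1 (by simp)
          · rintro ⟨h1, h2⟩
            rcases h1 with h1 | ⟨h1, -⟩
            · exact ⟨Or.inl h1, fun f hf => h2 f (List.mem_cons_of_mem _ hf)⟩
            · exact absurd h1 (by simp)
        · have : pvStepState (some v) e = some none := by
            unfold pvStepState
            simp [hv]
          rw [this, state_sticky]
          constructor
          · intro h; exact absurd h (by simp)
          · rintro ⟨h1, h2⟩
            have hte := h2 e (by simp) he
            rcases h1 with h1 | ⟨h1, -⟩
            · have hvt : v = some t := by injection h1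
              exact absurd (by rw [hte, hvt]) hv
            · exact absurd h1 (by simp)
    · have hstep : pvStep' p s e = s := by unfold pvStep'; rw [if_neg he]
      rw [hstep, ih]
      constructor
      · rintro ⟨h1, h2⟩
        refine ⟨?_, ?_⟩
        · rcases h1 with h1 | ⟨h1, f, hf, htf⟩
          · exact Or.inl h1
          · exact Or.inr ⟨h1, f, List.mem_cons_of_mem _ hf, htf⟩
        · intro f hf htf
          rcases List.mem_cons.mp hf with rfl | hf
          · exact absurd htf he
          · exact h2 f hf htf
      · rintro ⟨h1, h2⟩
        refine ⟨?_, fun f hf => h2 f (List.mem_cons_of_mem _ hf)⟩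
        rcases h1 with h1 | ⟨h1, f, hf, htf⟩
        · exact Or.inl h1
        · rcases List.mem_cons.mp hf with rfl | hf
          · exact absurd htf he
          · exact Or.inr ⟨h1, f, hf, htf⟩

lemma fold_state_none (p : Int) :
    ∀ (l : List (List Int)) (s : Option (Option (List Int))),
      (l.foldl (pvStep' p) s = none) ↔ (s = none ∧ ∀ e ∈ l, (e.take 2).contains p = false) := by
  intro l
  induction l with
  | nil => intro s; simp
  | cons e tl ih =>
    intro s
    simp only [List.foldl_cons]
    by_cases he : (e.take 2).contains p
    · have hstep : pvStep' p s e = pvStepState s e := by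
        unfold pvStep'; rw [if_pos he]
      rw [hstep, ih]
      have hns : pvStepState s e ≠ none := by
        unfold pvStepState
        cases s with
        | none => simp
        | some v => by_cases hv : v = some e <;> simp [hv]
      constructor
      · rintro ⟨h1, -⟩; exact absurd h1 hns
      · rintro ⟨-, h2⟩
        have hf := h2 e (by simp)
        rw [hf] at he
        exact Bool.noConfusion he
    · have hstep : pvStep' p s e = s := by unfold pvStep'; rw [if_neg he]
      rw [hstep, ih]
      constructor
      · rintro ⟨h1, h2⟩
        refine ⟨h1, ?_⟩
        intro f hf
        rcases List.mem_cons.mp hf with rfl | hf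
        · simpa using he
        · exact h2 f hf
      · rintro ⟨h1, h2⟩
        exact ⟨h1, fun f hf => h2 f (List.mem_cons_of_mem _ hf)⟩

-- B's per-endpoint dict test equals isolation
lemma isoB_iff (edges : List (List Int)) (e : List Int) (p : Int) :
    ((pvSeen edges).getD p (some e) == some e) = pvIsoB edges e p := by
  have hget : (pvSeen edges).get? p = edges.foldl (pvStep' p) none := by
    unfold pvSeen
    rw [seen_fold_get edges PySem.Dict.empty p, PySem.Dict.get?_empty]
  rw [PySem.Dict.getD_eq_get?_getD, hget]
  have hiso : pvIsoB edges e p = true ↔ ∀ f ∈ edges, (f.take 2).contains p = true → f = e := by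
    unfold pvIsoB
    rw [List.all_eq_true]
    constructor
    · intro h f hf htf
      have := h f hf
      rw [touches_take2] at this
      simp only [Bool.or_eq_true, beq_iff_eq, Bool.not_eq_true', htf] at this
      rcases this with h' | h'
      · exact h'
      · cases h'
    · intro h f hf
      rw [touches_take2]
      by_cases htf : (f.take 2).contains p
      · simp [h f hf htf]
      · rw [Bool.not_eq_true] at htf
        rw [htf]
        simp
  apply Bool.eq_iff_iff.mpr
  constructor
  · intro hle
    cases hfold : edges.foldl (pvStep' p) none with
    | none =>
      rw [hiso]
      intro f hf htf
      have h0 := ((fold_state_none p edges none).mp hfold).2 f hf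
      rw [h0] at htf
      exact Bool.noConfusion htf
    | some v =>
      rw [hfold] at hle
      simp only [Option.getD_some, beq_iff_eq] at hle
      subst hle
      rw [hiso]
      exact ((fold_state_some p e edges none).mp hfold).2
  · intro hisoT
    rw [hiso] at hisoT
    by_cases hex : ∃ f ∈ edges, (f.take 2).contains p = true
    · have hfold : edges.foldl (pvStep' p) none = some (some e) := by
        rw [fold_state_some]
        obtain ⟨f, hf, htf⟩ := hex
        have : f = e := hisoT f hf htf
        subst this
        exact ⟨Or.inr ⟨rfl, f, hf, htf⟩, hisoT⟩
      rw [hfold]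
      simp
    · have hfold : edges.foldl (pvStep' p) none = none := by
        rw [fold_state_none]
        refine ⟨rfl, ?_⟩
        intro f hf
        by_cases h : (f.take 2).contains p
        · exact absurd ⟨f, hf, h⟩ hex
        · simpa using h
      rw [hfold]
      simp

-- the two outer loops perform the same step
lemma step_eq (edges : List (List Int)) (st : List (List Int) × List Int) (e : List Int) :
    pvStepA edges st e
      = (fun (st : List (List Int) × List Int) e =>
          let np := st.2 ++ e.filter (fun p => (pvSeen edges).getD p (some e) == some e)
          if np.length = 2 then (st.1 ++ [np], ([] : List Int)) else (st.1, np)) st e := by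
  unfold pvStepA
  rw [np_fold]
  have hfil : e.filter (fun p => (pvSeen edges).getD p (some e) == some e)
      = e.filter (fun p => pvIsoB edges e p) := by
    apply List.filter_congr
    intro p _
    rw [isoB_iff]
  simp only [hfil]

lemma foldl_congr_mem' {α β : Type} (l : List α) (f g : β → α → β) (s : β)
    (h : ∀ b : β, ∀ x ∈ l, f b x = g b x) : l.foldl f s = l.foldl g s := by
  induction l generalizing s with
  | nil => rfl
  | cons a t ih =>
    simp only [List.foldl_cons, h s a (by simp)]
    exact ih _ (fun b x hx => h b x (List.mem_cons_of_mem _ hx))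

theorem main_eq (edges : List (List Int)) : get_miss_edge edges = get_miss_edge_alt edges := by
  unfold get_miss_edge get_miss_edge_alt
  have h : edges.foldl (pvStepA edges) ([], [])
      = edges.foldl (fun (st : List (List Int) × List Int) e =>
          let np := st.2 ++ e.filter (fun p => (pvSeen edges).getD p (some e) == some e)
          if np.length = 2 then (st.1 ++ [np], ([] : List Int)) else (st.1, np)) ([], []) := by
    apply foldl_congr_mem'
    intro st x _
    exact step_eq edges st x
  rw [h]

-- ===== VERDICT (by name: the statement is the Claim_ definition above) =====
theorem get_miss_edge_spec : Claim_equal_get_miss_edge := by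
  intro edges _ _
  exact main_eq edges
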